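-- pv_equiv track=rewrite | github.com/thehawkgriffith/DeathNoteGame | environment.py | check_majority
-- ===== SOURCE A (Python) =====
-- def check_majority(dict):
--     max_votes = max(dict.values())
--     num_occur = 0
--     for k, v in dict.items():
--         if v == max_votes:
--             num_occur += 1
--     if num_occur == 1:
--         return True
--     return False
-- ===== SOURCE B (Python) =====
-- def check_majority(dict):
--     vals = sorted(dict.values(), reverse=True)
--     return len(vals) == 1 or vals[0] != vals[1]
-- ===== Notes on version B (the rewrite author's own statement) =====
-- stated objective: alternative
-- what changed: Replaces A's find-max-then-count-occurrences two-pass scan with sorting the values in descending order and comparing the top two.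
import Mathlib
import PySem

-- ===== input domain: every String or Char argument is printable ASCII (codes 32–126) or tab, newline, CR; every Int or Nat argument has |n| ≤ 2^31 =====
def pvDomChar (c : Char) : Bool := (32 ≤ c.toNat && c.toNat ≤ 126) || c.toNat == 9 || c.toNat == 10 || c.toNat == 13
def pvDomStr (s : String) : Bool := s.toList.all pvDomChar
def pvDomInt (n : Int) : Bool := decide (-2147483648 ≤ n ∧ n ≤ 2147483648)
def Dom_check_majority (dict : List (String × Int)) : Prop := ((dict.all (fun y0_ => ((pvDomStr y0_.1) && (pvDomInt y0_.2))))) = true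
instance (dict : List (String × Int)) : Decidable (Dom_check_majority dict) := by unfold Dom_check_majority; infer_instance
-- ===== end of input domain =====

-- B replaces A's find-max-then-count scan with sort-descending-and-compare-top-two (alternative decomposition).

-- ===== PORT A =====
def check_majority (dict : List (String × Int)) : Bool :=
  let d := PySem.Dict.ofList dict
  match PySem.List.max? d.values (fun v => v) with
  | none => false  -- Python: max() raises ValueError on an empty dict; excluded by Pre_
  | some max_votes =>
    let num_occur : Int :=
      d.items.foldl (fun n kv => if kv.2 == max_votes then n + 1 else n) 0
    if num_occur == 1 then true else false

-- ===== PORT B =====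
def check_majority_alt (dict : List (String × Int)) : Bool :=
  let vals := PySem.List.sorted (PySem.Dict.ofList dict).values (fun v => v) true
  match vals with
  | [] => false       -- Python: vals[0] raises IndexError on an empty dict; excluded by Pre_
  | [_] => true       -- len(vals) == 1
  | a :: b :: _ => a != b

-- ===== PRECONDITION & SPEC =====
-- Pre_ excludes only the empty dict, on which both Pythons raise (A: ValueError from max(), B: IndexError).
def Pre_check_majority (dict : List (String × Int)) : Prop := dict ≠ []
instance (dict : List (String × Int)) : Decidable (Pre_check_majority dict) := by unfold Pre_check_majority; infer_instance
def pvWitness_check_majority : (List (String × Int)) := [("L", 3), ("Kira", 2)]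
def Spec_check_majority (dict : List (String × Int)) (out : Bool) : Prop := out = check_majority_alt dict
instance (dict : List (String × Int)) (out : Bool) : Decidable (Spec_check_majority dict out) := by unfold Spec_check_majority; infer_instance

-- ===== CLAIM (what is proved, stated in full; the proofs are below) =====
def Claim_equal_check_majority : Prop := ∀ (dict : List (String × Int)), Dom_check_majority dict → Pre_check_majority dict → Spec_check_majority dict (check_majority dict)

-- ===== LEMMAS AND PROOFS =====

-- A's counting loop over the items is the count of max_votes among the values.
lemma foldl_count_eq (l : List (String × Int)) (m : Int) (n : Int) :
    l.foldl (fun n kv => if kv.2 == m then n + 1 else n) n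
      = n + ((l.map Prod.snd).count m : Int) := by
  induction l generalizing n with
  | nil => simp
  | cons kv t ih =>
    simp only [List.foldl_cons, List.map_cons, ih]
    by_cases h : kv.2 = m
    · simp [h]
      ring
    · simp [h]

-- A nonempty input dict yields a nonempty value list.
lemma values_ne_nil (dict : List (String × Int)) (h : dict ≠ []) :
    (PySem.Dict.ofList dict).values ≠ [] := by
  have hk : (PySem.Dict.ofList dict).keys = PySem.Set.update (PySem.Dict.empty (κ := String) (ν := Int)).keys (dict.map Prod.fst) := by
    have := PySem.Dict.keys_foldl_insert_key (ν := Int) dict (Prod.fst) (fun _ p => p.2) PySem.Dict.empty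
    simpa [PySem.Dict.ofList, PySem.Dict.update] using this
  intro hv
  have hkn : (PySem.Dict.ofList dict).keys = [] := by
    simp [PySem.Dict.keys, PySem.Dict.values] at hv ⊢
    exact hv
  rw [hk] at hkn
  rcases dict with _ | ⟨p, t⟩
  · exact h rfl
  · have : p.1 ∈ PySem.Set.update (PySem.Dict.empty (κ := String) (ν := Int)).keys ((p :: t).map Prod.fst) := by
      simp [PySem.Set.mem_update]
    rw [hkn] at this
    simp at this

-- Main equivalence over an arbitrary value list with a maximum:
-- "the max occurs exactly once" = "sorted descending, the top two differ (or there is only one)".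
lemma main_vals (vs : List Int) (m : Int)
    (hm : PySem.List.max? vs (fun v => v) = some m) :
    ((if ((vs.count m : Int) == 1) then true else false) : Bool)
      = (match PySem.List.sorted vs (fun v => v) true with
         | [] => false
         | [_] => true
         | a :: b :: _ => a != b) := by
  have hmem := PySem.List.max?_mem hm
  have hmax := PySem.List.max?_isMax hm
  have hperm := PySem.List.sorted_perm vs (fun v => v) true
  have hpw := PySem.List.sorted_pairwise_rev vs (fun v => v)
  have hcnt : (PySem.List.sorted vs (fun v => v) true).count m = vs.count m :=
    hperm.count_eq m
  rcases hs : PySem.List.sorted vs (fun v => v) true with _ | ⟨a, rest⟩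
  · rw [PySem.List.sorted_eq_nil_iff] at hs
    subst hs; simp at hmem
  · have ha : a = m := by
      have h1 : a ≤ m := hmax a ((PySem.List.mem_sorted vs (fun v => v) true a).1 (hs ▸ List.mem_cons_self))
      have h2 : m ≤ a := PySem.List.key_head_sorted_rev_ge vs (fun v => v) hs m hmem
      omega
    subst ha
    rw [hs] at hcnt hpw
    rcases rest with _ | ⟨b, r⟩
    · simp at hcnt
      simp [← hcnt]
    · rw [List.pairwise_cons] at hpw
      obtain ⟨hble, hpw2⟩ := hpw
      rw [List.pairwise_cons] at hpw2
      obtain ⟨hrle, _⟩ := hpw2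
      by_cases hb : b = a
      · subst hb
        have h2c : 2 ≤ (b :: b :: r).count b := by
          simp
        rw [hcnt.symm]
        simp only [bne_self_eq_false]
        rw [if_neg]
        simp only [beq_iff_eq]
        omega
      · have hcnt2 : (a :: b :: r).count a = 1 := by
          have hbla : b ≤ a := hble b (by simp)
          have hr : ∀ x ∈ r, x ≠ a := by
            intro x hx
            have := hrle x hx
            have := hble x (by simp [hx])
            intro hxa; subst hxa
            omega
          simp [List.count_eq_zero_of_not_mem (fun hm2 => hr a hm2 rfl), hb]
        rw [← hcnt, hcnt2]
        simp [bne_iff_ne, Ne.symm hb]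

-- ===== VERDICT (by name: the statement is the Claim_ definition above) =====
theorem check_majority_spec : Claim_equal_check_majority := by
  intro dict _ hpre
  unfold Spec_check_majority check_majority check_majority_alt
  have hvne := values_ne_nil dict hpre
  rcases hm : PySem.List.max? (PySem.Dict.ofList dict).values (fun v => v) with _ | m
  · rw [PySem.List.max?_eq_none_iff] at hm
    exact absurd hm hvne
  · simp only at hm ⊢
    rw [hm]
    simp only [foldl_count_eq, zero_add]
    have : ((PySem.Dict.ofList dict).items.map Prod.snd) = (PySem.Dict.ofList dict).values := rfl
    rw [this]
    exact main_vals _ m hm
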